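-- pv_equiv track=rewrite | github.com/TheFieryLynx/PythonIntro2021 | HW_03/DivDigit.py | divdigit
-- ===== SOURCE A (Python) =====
-- def divdigit(n):
-- 	tmp = n
-- 	cnt = 0
-- 	while n > 0:
-- 		if n % 10 > 0 and tmp % (n % 10) == 0:
-- 			cnt += 1
-- 		n //= 10
-- 	return cnt
-- ===== SOURCE B (Python) =====
-- def divdigit(n):
--     if n <= 0:
--         return 0
--     s = str(n)
--     total = 0
--     for d in range(1, 10):
--         if n % d == 0:
--             total += s.count(chr(48 + d))
--     return total
-- ===== Notes on version B (the rewrite author's own statement) =====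
-- stated objective: alternative
-- what changed: B inverts the traversal: instead of walking the digits of n and testing divisibility at each position, it loops over the nine possible digit values d=1..9, tests n % d == 0 once per value, and adds the occurrence count of that digit in str(n).
import Mathlib
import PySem

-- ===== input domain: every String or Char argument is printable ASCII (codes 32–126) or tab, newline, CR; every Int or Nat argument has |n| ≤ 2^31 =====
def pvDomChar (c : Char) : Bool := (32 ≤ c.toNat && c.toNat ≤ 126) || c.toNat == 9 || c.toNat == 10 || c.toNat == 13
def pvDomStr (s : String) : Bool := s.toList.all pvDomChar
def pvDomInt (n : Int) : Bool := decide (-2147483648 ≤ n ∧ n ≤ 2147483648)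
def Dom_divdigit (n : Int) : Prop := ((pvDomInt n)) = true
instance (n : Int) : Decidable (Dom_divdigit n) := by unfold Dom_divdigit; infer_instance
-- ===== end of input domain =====

-- B inverts the traversal: instead of A's per-position digit loop it tests
-- divisibility once for each digit value 1..9 and adds that digit's occurrence
-- count in str(n) (objective: alternative).

-- ===== PORT A =====
-- the while-loop of A: state (n, cnt), tmp fixed; fuel only makes the
-- recursion structural (n.toNat + 1 steps always suffice since n shrinks by //10)
def divdigitLoop (tmp : Int) (fuel : Nat) (n cnt : Int) : Int :=
  match fuel with
  | 0 => cnt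
  | f + 1 =>
    if 0 < n then
      divdigitLoop tmp f (PySem.Int.floordiv n 10)
        (if 0 < PySem.Int.mod n 10 ∧ PySem.Int.mod tmp (PySem.Int.mod n 10) = 0 then cnt + 1 else cnt)
    else cnt

def divdigit (n : Int) : Int := divdigitLoop n (n.toNat + 1) n 0

-- ===== PORT B =====
-- s.count(chr(48+d)) with a one-character needle = PySem.Str.count s (that one-char string), exact
def divdigit_alt (n : Int) : Int :=
  if n ≤ 0 then 0
  else
    (PySem.List.pyRange 1 10 1).foldl
      (fun total d =>
        if PySem.Int.mod n d = 0 then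
          total + (PySem.Str.count (PySem.Int.toStr n) (String.ofList [Char.ofNat (48 + d.toNat)]) : Int)
        else total) 0

-- ===== PRECONDITION & SPEC =====
def Spec_divdigit (n : Int) (out : Int) : Prop := out = divdigit_alt n
instance (n : Int) (out : Int) : Decidable (Spec_divdigit n out) := by unfold Spec_divdigit; infer_instance

-- ===== CLAIM (what is proved, stated in full; the proofs are below) =====
def Claim_equal_divdigit : Prop := ∀ (n : Int), Dom_divdigit n → Spec_divdigit n (divdigit n)

-- ===== LEMMAS AND PROOFS =====

-- the digit-count of A expressed as a pure ℕ recursion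
def cnt10 (tmp : Int) (m : Nat) : Int :=
  if m = 0 then 0
  else (if m % 10 ≠ 0 ∧ PySem.Int.mod tmp ((m % 10 : Nat) : Int) = 0 then 1 else 0)
        + cnt10 tmp (m / 10)
termination_by m
decreasing_by omega

-- the decimal digits of m, most-significant-first (characterisation of Nat.toDigits 10)
def digs (m : Nat) : List Char :=
  if m / 10 = 0 then [(m % 10).digitChar]
  else digs (m / 10) ++ [(m % 10).digitChar]
termination_by m
decreasing_by omega

lemma fd10 (n : Int) : PySem.Int.floordiv n 10 = n / 10 := by
  simp [PySem.Int.floordiv, Int.fdiv_eq_ediv]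

lemma fm10 (n : Int) : PySem.Int.mod n 10 = n % 10 := by
  simp [PySem.Int.mod, Int.fmod_eq_emod]

lemma loop_eq_cnt10 (tmp : Int) : ∀ (f m : Nat) (cnt : Int), m < f →
    divdigitLoop tmp f (m : Int) cnt = cnt + cnt10 tmp m := by
  intro f
  induction f with
  | zero => intro m cnt h; omega
  | succ f ih =>
    intro m cnt h
    rw [divdigitLoop, cnt10]
    by_cases hm : m = 0
    · simp [hm]
    · have hpos : (0 : Int) < (m : Int) := by omega
      rw [if_pos hpos, fd10, fm10]
      have hdiv : (m : Int) / 10 = ((m / 10 : Nat) : Int) := by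
        omega
      have hmod : (m : Int) % 10 = ((m % 10 : Nat) : Int) := by
        omega
      rw [hdiv, hmod, ih (m / 10) _ (by omega)]
      simp only [if_neg hm]
      by_cases hc : m % 10 ≠ 0 ∧ PySem.Int.mod tmp ((m % 10 : Nat) : Int) = 0
      · rw [if_pos hc, if_pos ⟨by omega, hc.2⟩]; ring
      · have : ¬ (0 < ((m % 10 : Nat) : Int) ∧ PySem.Int.mod tmp ((m % 10 : Nat) : Int) = 0) := by
          intro h; exact hc ⟨by omega, h.2⟩
        rw [if_neg hc, if_neg this]; ring

lemma toDigitsCore_eq (f : Nat) :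
    ∀ (m : Nat) (acc : List Char), m < f →
      Nat.toDigitsCore 10 f m acc = digs m ++ acc := by
  induction f with
  | zero => intro m acc h; omega
  | succ f ih =>
    intro m acc h
    rw [Nat.toDigitsCore, digs]
    by_cases h0 : m / 10 = 0
    · simp [h0]
    · rw [if_neg h0, if_neg h0, ih (m / 10) _ (by omega)]
      simp

lemma toDigits_eq (m : Nat) : Nat.toDigits 10 m = digs m := by
  have := toDigitsCore_eq (m + 1) m [] (by omega)
  simpa [Nat.toDigits] using this

-- counting a one-character needle is counting that character
lemma go_single (c : Char) : ∀ (fuel : Nat) (l : List Char) (acc : Nat), l.length ≤ fuel →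
    PySem.Chars.count.go [c] fuel l acc = acc + l.count c := by
  intro fuel
  induction fuel with
  | zero =>
    intro l acc h
    have : l = [] := by cases l <;> simp_all
    simp [this, PySem.Chars.count.go]
  | succ f ih =>
    intro l acc h
    match l with
    | [] => simp [PySem.Chars.count.go]
    | h0 :: t =>
      rw [PySem.Chars.count.go]
      by_cases hc : [c].isPrefixOf (h0 :: t)
      · simp only [hc, if_true, List.length_singleton, List.drop_one, List.tail_cons]
        rw [ih t (acc+1) (by simpa using h)]
        have : c = h0 := by simpa [List.isPrefixOf] using hc
        simp [← this]; omega
      · simp only [hc, Bool.false_eq_true, if_false]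
        rw [ih t acc (by simpa using h)]
        have hne : h0 ≠ c := fun e => (by simpa [List.isPrefixOf] using hc : ¬ c = h0) e.symm
        simp [hne]

lemma count_single (c : Char) (l : List Char) : PySem.Chars.count l [c] = l.count c := by
  simp [PySem.Chars.count, go_single c l.length l 0 le_rfl]

-- pull the if-accumulator loop apart into a sum of per-value contributions
lemma foldl_if_sum (p : Int → Prop) [DecidablePred p] (c : Int → Int) :
    ∀ (L : List Int) (a : Int),
      L.foldl (fun t d => if p d then t + c d else t) a
        = a + (L.map (fun d => if p d then c d else 0)).sum := by
  intro L
  induction L with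
  | nil => intro a; simp
  | cons x xs ih =>
    intro a
    rw [List.foldl_cons, List.map_cons, List.sum_cons, ih]
    by_cases hx : p x
    · simp [hx]; ring
    · simp [hx]

def oneToNine : List Int := [1, 2, 3, 4, 5, 6, 7, 8, 9]

lemma pyRange_1_10 : PySem.List.pyRange 1 10 1 = oneToNine := by decide

-- the nine-value sum over a single digit character collapses to A's per-digit test
lemma contrib (n : Int) (e : Nat) (he : e < 10) :
    (oneToNine.map (fun d => if PySem.Int.mod n d = 0 then (([e.digitChar].count (Char.ofNat (48 + d.toNat))) : Int) else 0)).sum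
      = if e ≠ 0 ∧ PySem.Int.mod n (e : Int) = 0 then 1 else 0 := by
  interval_cases e <;> simp [oneToNine, List.count_cons, Nat.digitChar]

lemma sum_digs (n : Int) (m : Nat) :
    (oneToNine.map (fun d => if PySem.Int.mod n d = 0 then (((digs m).count (Char.ofNat (48 + d.toNat))) : Int) else 0)).sum
      = cnt10 n m := by
  induction m using Nat.strong_induction_on with
  | _ m ih =>
    rw [digs, cnt10]
    by_cases h0 : m / 10 = 0
    · rw [if_pos h0]
      by_cases hm : m = 0
      · subst hm
        simpa using contrib n 0 (by omega)
      · rw [if_neg hm]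
        have hcnt0 : cnt10 n (m / 10) = 0 := by rw [cnt10]; simp [h0]
        rw [hcnt0, contrib n (m % 10) (Nat.mod_lt _ (by omega))]
        ring
    · rw [if_neg h0, if_neg (by omega : ¬ m = 0)]
      have hsplit :
          (oneToNine.map (fun d => if PySem.Int.mod n d = 0 then (((digs (m / 10) ++ [(m % 10).digitChar]).count (Char.ofNat (48 + d.toNat))) : Int) else 0)).sum
            = (oneToNine.map (fun d => if PySem.Int.mod n d = 0 then (((digs (m / 10)).count (Char.ofNat (48 + d.toNat))) : Int) else 0)).sum
              + (oneToNine.map (fun d => if PySem.Int.mod n d = 0 then (([(m % 10).digitChar].count (Char.ofNat (48 + d.toNat))) : Int) else 0)).sum := by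
        rw [← List.sum_map_add]
        congr 1
        apply List.map_congr_left
        intro d _
        by_cases hd : PySem.Int.mod n d = 0 <;> simp [hd, List.count_append]
      rw [hsplit, ih (m / 10) (by omega), contrib n (m % 10) (Nat.mod_lt _ (by omega))]
      ring

-- ===== VERDICT (by name: the statement is the Claim_ definition above) =====
theorem divdigit_spec : Claim_equal_divdigit := by
  intro n _
  unfold Spec_divdigit divdigit divdigit_alt
  by_cases hn : n ≤ 0
  · rw [if_pos hn, divdigitLoop, if_neg (by omega)]
  · rw [if_neg hn]
    have hloop : divdigitLoop n (n.toNat + 1) n 0 = cnt10 n n.toNat := by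
      have hm : n = ((n.toNat : Nat) : Int) := by omega
      nth_rewrite 3 [hm]
      rw [loop_eq_cnt10 n (n.toNat + 1) n.toNat 0 (by omega)]
      ring
    rw [hloop, pyRange_1_10, foldl_if_sum (fun d => PySem.Int.mod n d = 0)]
    have htc : (PySem.Int.toStr n).toList = digs n.toNat := by
      rw [PySem.Int.toList_toStr, PySem.Int.toChars, if_neg (by omega), ← toDigits_eq]
    have hmap : ∀ d ∈ oneToNine,
        (if PySem.Int.mod n d = 0 then
            (PySem.Str.count (PySem.Int.toStr n) (String.ofList [Char.ofNat (48 + d.toNat)]) : Int)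
          else 0)
          = (if PySem.Int.mod n d = 0 then (((digs n.toNat).count (Char.ofNat (48 + d.toNat))) : Int) else 0) := by
      intro d _
      rw [PySem.Str.count_eq, htc, String.toList_ofList, count_single]
    rw [List.map_congr_left hmap, sum_digs n n.toNat]
    ring
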